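-- pv_equiv track=rewrite | github.com/sjonas50/nomad2.0 | sidecar/extractors/entities.py | _classify_heuristic
-- ===== SOURCE A (Python) =====
-- _PLACE_SUFFIXES = {
--     "City", "County", "State", "Country", "River", "Mountain", "Lake",
--     "Island", "Bay", "Ocean", "Sea", "Park", "Street", "Avenue",
-- }
--
-- _ORG_SUFFIXES = {
--     "Inc", "Corp", "LLC", "Ltd", "University", "College", "Institute",
--     "Foundation", "Association", "Company", "Group", "Agency", "Department",
-- }
--
-- _TITLE_PREFIXES = {
--     "Mr", "Mrs", "Ms", "Dr", "Prof", "President", "Senator", "General",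
--     "Captain", "King", "Queen", "Prince", "Princess",
-- }
--
-- def _classify_heuristic(name: str) -> str:
--     """Classify an entity using keyword heuristics."""
--     tokens = name.split()
--     if tokens[0] in _TITLE_PREFIXES:
--         return "person"
--     if any(t in _ORG_SUFFIXES for t in tokens):
--         return "org"
--     if any(t in _PLACE_SUFFIXES for t in tokens):
--         return "place"
--     return "concept"
-- ===== SOURCE B (Python) =====
-- _TITLE_PREFIXES = (
--     "Mr", "Mrs", "Ms", "Dr", "Prof", "President", "Senator", "General",
--     "Captain", "King", "Queen", "Prince", "Princess",
-- )
--
-- # one combined keyword -> category table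
-- _KEYWORD_CAT = dict(
--     [(k, "org") for k in (
--         "Inc", "Corp", "LLC", "Ltd", "University", "College", "Institute",
--         "Foundation", "Association", "Company", "Group", "Agency", "Department",
--     )] +
--     [(k, "place") for k in (
--         "City", "County", "State", "Country", "River", "Mountain", "Lake",
--         "Island", "Bay", "Ocean", "Sea", "Park", "Street", "Avenue",
--     )]
-- )
--
--
-- def _classify_heuristic(name: str) -> str:
--     """Classify an entity using a single combined keyword table and one pass."""
--     tokens = name.split()
--     if tokens[0] in _TITLE_PREFIXES:
--         return "person"
--     saw_org = saw_place = False
--     for t in tokens: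
--         cat = _KEYWORD_CAT.get(t)
--         if cat == "org":
--             saw_org = True
--         elif cat == "place":
--             saw_place = True
--     return "org" if saw_org else "place" if saw_place else "concept"
-- ===== Notes on version B (the rewrite author's own statement) =====
-- stated objective: alternative
-- what changed: Replaces the two separate any()-scans over the org and place sets by one combined keyword->category dict and a single pass over the tokens that records which categories were seen, resolving org-over-place precedence at the end. Pre_ excludes names with no whitespace-separated tokens, on which both A and B raise IndexError at tokens[0].
import Mathlib
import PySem

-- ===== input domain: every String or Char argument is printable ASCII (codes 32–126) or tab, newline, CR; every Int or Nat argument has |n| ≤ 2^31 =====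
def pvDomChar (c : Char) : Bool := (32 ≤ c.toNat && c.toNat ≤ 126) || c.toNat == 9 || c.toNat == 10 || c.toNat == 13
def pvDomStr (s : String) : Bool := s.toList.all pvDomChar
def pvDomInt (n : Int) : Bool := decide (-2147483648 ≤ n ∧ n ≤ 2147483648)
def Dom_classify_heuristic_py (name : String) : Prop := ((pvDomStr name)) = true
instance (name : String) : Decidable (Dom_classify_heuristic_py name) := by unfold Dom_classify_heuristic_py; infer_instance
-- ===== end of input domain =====

-- B replaces A's two separate any()-scans over the org/place sets by one combined
-- keyword->category dict and a single pass recording which categories were seen (alternative, not faster).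

-- ===== PORT A =====
def pvPlaceSuffixes : List String :=
  ["City", "County", "State", "Country", "River", "Mountain", "Lake",
   "Island", "Bay", "Ocean", "Sea", "Park", "Street", "Avenue"]

def pvOrgSuffixes : List String :=
  ["Inc", "Corp", "LLC", "Ltd", "University", "College", "Institute",
   "Foundation", "Association", "Company", "Group", "Agency", "Department"]

def pvTitlePrefixes : List String :=
  ["Mr", "Mrs", "Ms", "Dr", "Prof", "President", "Senator", "General",
   "Captain", "King", "Queen", "Prince", "Princess"]

def classify_heuristic_py (name : String) : String :=
  let tokens := PySem.Str.split₀ name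
  match PySem.List.pyGet? tokens 0 with    -- tokens[0]; none = IndexError, excluded by Pre_
  | none => ""
  | some t0 =>
    if pvTitlePrefixes.contains t0 then "person"
    else if tokens.any (fun t => pvOrgSuffixes.contains t) then "org"
    else if tokens.any (fun t => pvPlaceSuffixes.contains t) then "place"
    else "concept"

-- ===== PORT B =====
def pvTitlePrefixesB : List String :=
  ["Mr", "Mrs", "Ms", "Dr", "Prof", "President", "Senator", "General",
   "Captain", "King", "Queen", "Prince", "Princess"]

def pvOrgKeys : List String :=
  ["Inc", "Corp", "LLC", "Ltd", "University", "College", "Institute",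
   "Foundation", "Association", "Company", "Group", "Agency", "Department"]

def pvPlaceKeys : List String :=
  ["City", "County", "State", "Country", "River", "Mountain", "Lake",
   "Island", "Bay", "Ocean", "Sea", "Park", "Street", "Avenue"]

def pvKeywordCat : PySem.Dict String String :=
  PySem.Dict.ofList (pvOrgKeys.map (fun k => (k, "org")) ++ pvPlaceKeys.map (fun k => (k, "place")))

-- the body of B's single loop: look the token up in the combined table, set the matching flag
def pvStep (acc : Bool × Bool) (t : String) : Bool × Bool :=
  match pvKeywordCat.get? t with
  | some c => if c == "org" then (true, acc.2)
              else if c == "place" then (acc.1, true)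
              else acc
  | none => acc

def classify_heuristic_py_alt (name : String) : String :=
  let tokens := PySem.Str.split₀ name
  match PySem.List.pyGet? tokens 0 with    -- tokens[0]; none = IndexError, excluded by Pre_
  | none => ""
  | some t0 =>
    if pvTitlePrefixesB.contains t0 then "person"
    else
      let flags := tokens.foldl pvStep (false, false)
      if flags.1 then "org" else if flags.2 then "place" else "concept"

-- ===== PRECONDITION & SPEC =====
-- Pre_ excludes names that split into no tokens (empty/whitespace-only), where A raises IndexError.
def Pre_classify_heuristic_py (name : String) : Prop := PySem.Str.split₀ name ≠ []
instance (name : String) : Decidable (Pre_classify_heuristic_py name) := by unfold Pre_classify_heuristic_py; infer_instance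
def pvWitness_classify_heuristic_py : String := "Acme Inc"

def Spec_classify_heuristic_py (name : String) (out : String) : Prop := out = classify_heuristic_py_alt name
instance (name : String) (out : String) : Decidable (Spec_classify_heuristic_py name out) := by unfold Spec_classify_heuristic_py; infer_instance

-- ===== CLAIM (what is proved, stated in full; the proofs are below) =====
def Claim_equal_classify_heuristic_py : Prop := ∀ (name : String), Dom_classify_heuristic_py name → Pre_classify_heuristic_py name → Spec_classify_heuristic_py name (classify_heuristic_py name)

-- ===== LEMMAS AND PROOFS =====

-- lookup in a dict literal built from two constant-valued key lists, by induction on the lists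
theorem pv_get?_mk_two (ks ls : List String) (t : String) :
    (PySem.Dict.mk (ks.map (fun k => (k, "org")) ++ ls.map (fun k => (k, "place")))).get? t =
      (if ks.contains t then some "org" else if ls.contains t then some "place" else none) := by
  induction ks with
  | nil =>
    simp only [List.map_nil, List.nil_append, List.contains_nil]
    induction ls with
    | nil => simp [PySem.Dict.get?]
    | cons l ls ihl =>
      simp only [List.map_cons, PySem.Dict.get?_mk_cons, List.contains_cons, ihl]
      by_cases h : l == t
      · simp_all
      · have h' : ¬ t = l := fun e => h (by simp [e])
        simp_all
  | cons k ks ihk =>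
    simp only [List.map_cons, List.cons_append, PySem.Dict.get?_mk_cons, List.contains_cons, ihk]
    by_cases h : k == t
    · simp_all
    · have h' : ¬ t = k := fun e => h (by simp [e])
      simp_all

-- the combined dict looks a token up exactly as A's two membership tests do (org wins; keys are distinct)
set_option maxHeartbeats 1000000 in
theorem pvKeywordCat_get? (t : String) :
    pvKeywordCat.get? t =
      (if pvOrgSuffixes.contains t then some "org"
       else if pvPlaceSuffixes.contains t then some "place" else none) := by
  have h : pvKeywordCat = PySem.Dict.mk
      (pvOrgKeys.map (fun k => (k, "org")) ++ pvPlaceKeys.map (fun k => (k, "place"))) := by decide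
  have ho : pvOrgKeys = pvOrgSuffixes := rfl
  have hp : pvPlaceKeys = pvPlaceSuffixes := rfl
  rw [h, pv_get?_mk_two, ho, hp]

-- no keyword is in both suffix lists
theorem pv_disjoint : ∀ t ∈ pvOrgSuffixes, pvPlaceSuffixes.contains t = false := by decide

-- one step of B's loop, written with A's membership tests
theorem pvStep_eq (acc : Bool × Bool) (t : String) :
    pvStep acc t =
      (acc.1 || pvOrgSuffixes.contains t,
       acc.2 || (!pvOrgSuffixes.contains t && pvPlaceSuffixes.contains t)) := by
  rw [pvStep, pvKeywordCat_get? t]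
  cases ho : pvOrgSuffixes.contains t <;> cases hp : pvPlaceSuffixes.contains t <;> simp_all

-- the one-pass fold computes exactly the two any()-scans
theorem pv_fold_flags (ts : List String) (a b : Bool) :
    ts.foldl pvStep (a, b)
      = (a || ts.any (fun t => pvOrgSuffixes.contains t),
         b || ts.any (fun t => pvPlaceSuffixes.contains t)) := by
  induction ts generalizing a b with
  | nil => simp
  | cons t ts ih =>
    rw [List.foldl_cons, pvStep_eq, ih]
    cases ho : pvOrgSuffixes.contains t <;> cases hp : pvPlaceSuffixes.contains t <;>
      simp_all [List.any_cons]
    exact absurd hp (by simpa using pv_disjoint t ho)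

-- ===== VERDICT (by name: the statement is the Claim_ definition above) =====
theorem classify_heuristic_py_spec : Claim_equal_classify_heuristic_py := by
  intro name _ hpre
  unfold Spec_classify_heuristic_py classify_heuristic_py classify_heuristic_py_alt
  cases hg : PySem.List.pyGet? (PySem.Str.split₀ name) 0 with
  | none => simp [hg]
  | some t0 =>
    have htitle : pvTitlePrefixesB = pvTitlePrefixes := rfl
    simp only [hg, htitle, pv_fold_flags, Bool.false_or]
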